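-- pv_equiv track=rewrite | github.com/aAbstract/labtronic-hmi | scripts/create_qspi_buffer.py | fmt_bin_data
-- ===== SOURCE A (Python) =====
-- def fmt_bin_data(bin_data: list[str]) -> str:
--     bin_data_fmt = ''
--     for idx, byte in enumerate(bin_data):
--         bin_data_fmt += byte + ','
--         if (idx + 1) % 16 == 0:
--             bin_data_fmt += '\n'
--         elif (idx + 1) % 4 == 0:
--             bin_data_fmt += ' '
--     return bin_data_fmt
-- ===== SOURCE B (Python) =====
-- def fmt_bin_data(bin_data: list[str]) -> str:
--     out = ''
--     for i in range(0, len(bin_data), 16):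
--         chunk = bin_data[i:i + 16]
--         line = ''
--         for j in range(0, len(chunk), 4):
--             group = chunk[j:j + 4]
--             s = ''
--             for b in group:
--                 s += b + ','
--             if len(group) == 4:
--                 s += '\n' if j == 12 else ' '
--             line += s
--         out += line
--     return out
-- ===== Notes on version B (the rewrite author's own statement) =====
-- stated objective: alternative
-- what changed: Replaces the flat per-byte loop with modulo tests on a running index by a nested chunk-then-group traversal: slice the data into 16-byte lines, slice each line into 4-byte groups, render each group and append its separator (newline after the line-final complete group, space after other complete groups), so no global index or modulo arithmetic is needed.
import Mathlib
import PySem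

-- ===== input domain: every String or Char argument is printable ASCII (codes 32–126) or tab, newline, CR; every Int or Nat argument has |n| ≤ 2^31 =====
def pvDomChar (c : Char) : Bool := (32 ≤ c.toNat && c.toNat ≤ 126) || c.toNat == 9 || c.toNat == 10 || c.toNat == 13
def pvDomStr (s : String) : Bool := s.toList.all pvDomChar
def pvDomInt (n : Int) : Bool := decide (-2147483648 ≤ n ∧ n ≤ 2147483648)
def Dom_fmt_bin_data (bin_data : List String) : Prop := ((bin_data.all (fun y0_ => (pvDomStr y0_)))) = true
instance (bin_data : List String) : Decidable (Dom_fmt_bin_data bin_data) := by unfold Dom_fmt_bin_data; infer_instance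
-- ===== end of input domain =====

-- B replaces the flat per-byte loop with modulo tests by a nested chunk(16)-then-group(4) traversal (alternative decomposition, same output).

-- ===== PORT A =====
def fmt_bin_data (bin_data : List String) : String :=
  (PySem.List.enumerate bin_data 0).foldl (fun bin_data_fmt p =>
    let bin_data_fmt := bin_data_fmt ++ p.2 ++ ","
    if PySem.Int.mod (p.1 + 1) 16 == 0 then bin_data_fmt ++ "\n"
    else if PySem.Int.mod (p.1 + 1) 4 == 0 then bin_data_fmt ++ " "
    else bin_data_fmt) ""

-- ===== PORT B =====
-- inner byte loop of Source B: s = ''; for b in group: s += b + ','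
def fmtGroupB (group : List String) : String :=
  group.foldl (fun s b => s ++ b ++ ",") ""

-- inner for-loop of Source B: for j in range(0, len(chunk), 4): ... line += s
def fmtLineB (chunk : List String) : String :=
  (PySem.List.pyRange 0 chunk.length 4).foldl (fun line j =>
    line ++
      (let group := PySem.List.slice chunk (some j) (some (j + 4))
       let s := fmtGroupB group
       if group.length == 4 then (if j == 12 then s ++ "\n" else s ++ " ") else s)) ""

-- outer for-loop of Source B: for i in range(0, len(bin_data), 16): ... out += line
def fmt_bin_data_alt (bin_data : List String) : String :=
  (PySem.List.pyRange 0 bin_data.length 16).foldl (fun out i =>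
    out ++ fmtLineB (PySem.List.slice bin_data (some i) (some (i + 16)))) ""

-- ===== PRECONDITION & SPEC =====
def Spec_fmt_bin_data (bin_data : List String) (out : String) : Prop := out = fmt_bin_data_alt bin_data
instance (bin_data : List String) (out : String) : Decidable (Spec_fmt_bin_data bin_data out) := by unfold Spec_fmt_bin_data; infer_instance

-- ===== CLAIM (what is proved, stated in full; the proofs are below) =====
def Claim_equal_fmt_bin_data : Prop := ∀ (bin_data : List String), Dom_fmt_bin_data bin_data → Spec_fmt_bin_data bin_data (fmt_bin_data bin_data)

-- ===== LEMMAS AND PROOFS =====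

-- proof-side peel formulations of B's loops (structural recursion used to relate the two ports)
def fmtLinePeel (chunk : List String) (j : Nat) : String :=
  match chunk with
  | [] => ""
  | x :: xs =>
      let group := (x :: xs).take 4
      let s := group.foldl (fun s b => s ++ b ++ ",") ""
      let s := if group.length == 4 then (if j == 12 then s ++ "\n" else s ++ " ") else s
      s ++ fmtLinePeel ((x :: xs).drop 4) (j + 4)
termination_by chunk.length
decreasing_by simp

def fmtLinesPeel (rest : List String) : String :=
  match rest with
  | [] => ""
  | x :: xs => fmtLinePeel ((x :: xs).take 16) 0 ++ fmtLinesPeel ((x :: xs).drop 16)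
termination_by rest.length
decreasing_by simp

-- A's loop body, named for the proofs
def stepA (acc : String) (p : Int × String) : String :=
  let acc := acc ++ p.2 ++ ","
  if PySem.Int.mod (p.1 + 1) 16 == 0 then acc ++ "\n"
  else if PySem.Int.mod (p.1 + 1) 4 == 0 then acc ++ " "
  else acc

theorem fmt_bin_data_eq_fold (l : List String) :
    fmt_bin_data l = (PySem.List.enumerate l 0).foldl stepA "" := rfl

theorem stepA_out (acc : String) (p : Int × String) :
    stepA acc p = acc ++ stepA "" p := by
  unfold stepA
  split_ifs with h1 h2 <;> simp [String.append_assoc, String.empty_append]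

theorem foldl_stepA_out (l : List (Int × String)) (acc : String) :
    l.foldl stepA acc = acc ++ l.foldl stepA "" := by
  induction l generalizing acc with
  | nil => simp [String.append_empty]
  | cons x xs ih =>
      simp only [List.foldl_cons]
      rw [ih (stepA acc x), ih (stepA "" x), stepA_out acc x, String.append_assoc]

theorem stepA_mid (acc b : String) (i : Int)
    (h16 : PySem.Int.mod (i + 1) 16 ≠ 0) (h4 : PySem.Int.mod (i + 1) 4 ≠ 0) :
    stepA acc (i, b) = acc ++ b ++ "," := by
  have h16' : ¬ (16 ∣ i + 1) := fun hd => h16 ((PySem.Int.mod_eq_zero_iff_dvd _ _).mpr hd)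
  have h4' : ¬ (4 ∣ i + 1) := fun hd => h4 ((PySem.Int.mod_eq_zero_iff_dvd _ _).mpr hd)
  simp [stepA, h16', h4']

theorem stepA_space (acc b : String) (i : Int)
    (h16 : PySem.Int.mod (i + 1) 16 ≠ 0) (h4 : PySem.Int.mod (i + 1) 4 = 0) :
    stepA acc (i, b) = acc ++ b ++ "," ++ " " := by
  have h16' : ¬ (16 ∣ i + 1) := fun hd => h16 ((PySem.Int.mod_eq_zero_iff_dvd _ _).mpr hd)
  have h4' : (4 ∣ i + 1) := (PySem.Int.mod_eq_zero_iff_dvd _ _).mp h4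
  simp [stepA, h16', h4']

theorem stepA_nl (acc b : String) (i : Int)
    (h16 : PySem.Int.mod (i + 1) 16 = 0) :
    stepA acc (i, b) = acc ++ b ++ "," ++ "\n" := by
  have h16' : (16 ∣ i + 1) := (PySem.Int.mod_eq_zero_iff_dvd _ _).mp h16
  simp [stepA, h16']

-- the chunk (line) invariant: folding A's step over a group-aligned tail of a line
-- equals B's inner loop, when the global index k sits at offset j of a line
theorem chunkEq (chunk : List String) (j k : Nat)
    (hlen : chunk.length + j ≤ 16) (hj : j % 4 = 0) (hk : k % 16 = j) :
    (PySem.List.enumerate chunk (k : Int)).foldl stepA "" = fmtLinePeel chunk j := by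
  have hj16 : j ≤ 12 := by omega
  match chunk with
  | [] => simp [fmtLinePeel, PySem.List.enumerate]
  | [a] =>
      have e1 : PySem.Int.mod ((k:Int) + 1) 16 ≠ 0 := by
        rw [PySem.Int.mod_eq_emod_of_pos (by norm_num)]; omega
      have e2 : PySem.Int.mod ((k:Int) + 1) 4 ≠ 0 := by
        rw [PySem.Int.mod_eq_emod_of_pos (by norm_num)]; omega
      simp [fmtLinePeel, PySem.List.enumerate, stepA_mid _ _ _ e1 e2,
        String.empty_append, String.append_empty]
  | [a, b] =>
      have hl : (2:Nat) + j ≤ 16 := hlen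
      have e1 : PySem.Int.mod ((k:Int) + 1) 16 ≠ 0 := by
        rw [PySem.Int.mod_eq_emod_of_pos (by norm_num)]; omega
      have e2 : PySem.Int.mod ((k:Int) + 1) 4 ≠ 0 := by
        rw [PySem.Int.mod_eq_emod_of_pos (by norm_num)]; omega
      have e3 : PySem.Int.mod ((k:Int) + 1 + 1) 16 ≠ 0 := by
        rw [PySem.Int.mod_eq_emod_of_pos (by norm_num)]; omega
      have e4 : PySem.Int.mod ((k:Int) + 1 + 1) 4 ≠ 0 := by
        rw [PySem.Int.mod_eq_emod_of_pos (by norm_num)]; omega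
      simp [fmtLinePeel, PySem.List.enumerate, stepA_mid _ _ _ e1 e2,
        stepA_mid _ _ _ e3 e4, String.empty_append, String.append_empty,
        String.append_assoc]
  | [a, b, c] =>
      have hl : (3:Nat) + j ≤ 16 := hlen
      have e1 : PySem.Int.mod ((k:Int) + 1) 16 ≠ 0 := by
        rw [PySem.Int.mod_eq_emod_of_pos (by norm_num)]; omega
      have e2 : PySem.Int.mod ((k:Int) + 1) 4 ≠ 0 := by
        rw [PySem.Int.mod_eq_emod_of_pos (by norm_num)]; omega
      have e3 : PySem.Int.mod ((k:Int) + 1 + 1) 16 ≠ 0 := by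
        rw [PySem.Int.mod_eq_emod_of_pos (by norm_num)]; omega
      have e4 : PySem.Int.mod ((k:Int) + 1 + 1) 4 ≠ 0 := by
        rw [PySem.Int.mod_eq_emod_of_pos (by norm_num)]; omega
      have e5 : PySem.Int.mod ((k:Int) + 1 + 1 + 1) 16 ≠ 0 := by
        rw [PySem.Int.mod_eq_emod_of_pos (by norm_num)]; omega
      have e6 : PySem.Int.mod ((k:Int) + 1 + 1 + 1) 4 ≠ 0 := by
        rw [PySem.Int.mod_eq_emod_of_pos (by norm_num)]; omega
      simp [fmtLinePeel, PySem.List.enumerate, stepA_mid _ _ _ e1 e2,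
        stepA_mid _ _ _ e3 e4, stepA_mid _ _ _ e5 e6,
        String.empty_append, String.append_empty, String.append_assoc]
  | a :: b :: c :: d :: rest =>
      have hl : rest.length + 4 + j ≤ 16 := by
        simp only [List.length_cons] at hlen; omega
      have e1 : PySem.Int.mod ((k:Int) + 1) 16 ≠ 0 := by
        rw [PySem.Int.mod_eq_emod_of_pos (by norm_num)]; omega
      have e2 : PySem.Int.mod ((k:Int) + 1) 4 ≠ 0 := by
        rw [PySem.Int.mod_eq_emod_of_pos (by norm_num)]; omega
      have e3 : PySem.Int.mod ((k:Int) + 1 + 1) 16 ≠ 0 := by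
        rw [PySem.Int.mod_eq_emod_of_pos (by norm_num)]; omega
      have e4 : PySem.Int.mod ((k:Int) + 1 + 1) 4 ≠ 0 := by
        rw [PySem.Int.mod_eq_emod_of_pos (by norm_num)]; omega
      have e5 : PySem.Int.mod ((k:Int) + 1 + 1 + 1) 16 ≠ 0 := by
        rw [PySem.Int.mod_eq_emod_of_pos (by norm_num)]; omega
      have e6 : PySem.Int.mod ((k:Int) + 1 + 1 + 1) 4 ≠ 0 := by
        rw [PySem.Int.mod_eq_emod_of_pos (by norm_num)]; omega
      have e8 : PySem.Int.mod ((k:Int) + 1 + 1 + 1 + 1) 4 = 0 := by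
        rw [PySem.Int.mod_eq_emod_of_pos (by norm_num)]; omega
      by_cases hj12 : j = 12
      · -- the line-final group: rest must be empty, the fourth byte gets '\n'
        have hrest : rest = [] := by
          cases rest with
          | nil => rfl
          | cons y ys => exfalso; simp only [List.length_cons] at hl; omega
        subst hrest; subst hj12
        have e7 : PySem.Int.mod ((k:Int) + 1 + 1 + 1 + 1) 16 = 0 := by
          rw [PySem.Int.mod_eq_emod_of_pos (by norm_num)]; omega
        simp [fmtLinePeel, PySem.List.enumerate, stepA_mid _ _ _ e1 e2,
          stepA_mid _ _ _ e3 e4, stepA_mid _ _ _ e5 e6, stepA_nl _ _ _ e7,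
          String.empty_append, String.append_empty, String.append_assoc]
      · have e7 : PySem.Int.mod ((k:Int) + 1 + 1 + 1 + 1) 16 ≠ 0 := by
          rw [PySem.Int.mod_eq_emod_of_pos (by norm_num)]; omega
        have ih := chunkEq rest (j + 4) (k + 4) (by omega) (by omega) (by omega)
        have hc : ((k:Int) + 1 + 1 + 1 + 1) = ((k + 4 : Nat) : Int) := by push_cast; ring
        simp only [fmtLinePeel, PySem.List.enumerate_cons, List.foldl_cons,
          List.take_succ_cons, List.take_zero, List.drop_succ_cons, List.drop_zero]
        rw [stepA_mid _ _ _ e1 e2, stepA_mid _ _ _ e3 e4, stepA_mid _ _ _ e5 e6,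
          stepA_space _ _ _ e7 e8, hc, foldl_stepA_out, ih]
        simp [String.empty_append, String.append_assoc, hj12]
termination_by chunk.length

theorem linesEq (l : List String) (k : Nat) (hk : k % 16 = 0) :
    (PySem.List.enumerate l (k : Int)).foldl stepA "" = fmtLinesPeel l := by
  match l with
  | [] => simp [fmtLinesPeel, PySem.List.enumerate]
  | x :: xs =>
      have hsplit : x :: xs = (x :: xs).take 16 ++ (x :: xs).drop 16 :=
        (List.take_append_drop 16 (x :: xs)).symm
      have hchunk := chunkEq ((x :: xs).take 16) 0 k
        (by rw [List.length_take]; omega) (by omega) (by omega)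
      conv_lhs => rw [hsplit]
      rw [PySem.List.enumerate_append, List.foldl_append, foldl_stepA_out, hchunk]
      by_cases hlen : (x :: xs).length ≤ 16
      · have hd : (x :: xs).drop 16 = [] := by
          apply List.drop_eq_nil_of_le; omega
        rw [hd]
        simp [fmtLinesPeel, PySem.List.enumerate, String.append_empty, hd]
      · have ht : ((x :: xs).take 16).length = 16 := by
          rw [List.length_take]; omega
        have hc : ((k:Int) + (((x :: xs).take 16).length : Int)) = ((k + 16 : Nat) : Int) := by
          rw [ht]; push_cast; ring
        rw [hc, linesEq ((x :: xs).drop 16) (k + 16) (by omega)]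
        simp [fmtLinesPeel]
termination_by l.length
decreasing_by simp

-- relating B's indexed loops to the peel formulations

theorem pyRange_cons_pos (s : Int) (hs : 0 < s) (a b : Int) (hab : a < b) :
    PySem.List.pyRange a b s = a :: PySem.List.pyRange (a + s) b s := by
  rw [PySem.List.pyRange_of_pos a b hs, PySem.List.pyRange_of_pos (a+s) b hs]
  rw [if_pos hab]
  have hN : ((b - a + s - 1) / s).toNat
      = (if a + s < b then ((b - (a + s) + s - 1) / s).toNat else 0) + 1 := by
    by_cases h : a + s < b
    · rw [if_pos h]
      have h1 : b - (a + s) + s - 1 = (b - a + s - 1) + (-1) * s := by ring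
      have h2 : (b - a + s - 1 + (-1) * s) / s = (b - a + s - 1) / s + (-1) :=
        Int.add_mul_ediv_right _ _ (by omega)
      have h3 : (1:Int) ≤ (b - a + s - 1) / s := by
        rw [Int.le_ediv_iff_mul_le hs]; omega
      rw [h1, h2]; omega
    · rw [if_neg h]
      have h4 : (b - a + s - 1) / s = 1 := by
        have hlo : (1:Int) ≤ (b - a + s - 1) / s := by
          rw [Int.le_ediv_iff_mul_le hs]; omega
        have hhi : (b - a + s - 1) / s < 2 := by
          rw [Int.ediv_lt_iff_lt_mul hs]; omega
        omega
      simp [h4]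
  rw [hN, List.range_succ_eq_map]
  simp only [List.map_cons, List.map_map, Nat.cast_zero, mul_zero, add_zero]
  congr 1
  apply List.map_congr_left
  intro k _
  simp only [Function.comp_apply]
  push_cast
  ring

theorem pyRange_nil_pos (s : Int) (hs : 0 < s) (a b : Int) (hab : ¬ a < b) :
    PySem.List.pyRange a b s = [] := by
  rw [PySem.List.pyRange_of_pos a b hs, if_neg hab]
  simp

theorem foldl_out_g (g : Int → String) (l : List Int) (acc : String) :
    l.foldl (fun a x => a ++ g x) acc = acc ++ l.foldl (fun a x => a ++ g x) "" := by
  induction l generalizing acc with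
  | nil => simp [String.append_empty]
  | cons x xs ih =>
      simp only [List.foldl_cons]
      rw [ih (acc ++ g x), ih ("" ++ g x), String.empty_append, String.append_assoc]

theorem fmtLinePeel_cons (l : List String) (j : Nat) (h : l ≠ []) :
    fmtLinePeel l j =
      (let group := l.take 4
       let s := group.foldl (fun s b => s ++ b ++ ",") ""
       if group.length == 4 then (if j == 12 then s ++ "\n" else s ++ " ") else s)
      ++ fmtLinePeel (l.drop 4) (j + 4) := by
  cases l with
  | nil => exact absurd rfl h
  | cons x xs => rw [fmtLinePeel]

theorem fmtLinesPeel_cons (l : List String) (h : l ≠ []) :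
    fmtLinesPeel l = fmtLinePeel (l.take 16) 0 ++ fmtLinesPeel (l.drop 16) := by
  cases l with
  | nil => exact absurd rfl h
  | cons x xs => rw [fmtLinesPeel]

theorem innerB (chunk : List String) (jn : Nat) :
    (PySem.List.pyRange (jn : Int) chunk.length 4).foldl (fun line j =>
      line ++
        (let group := PySem.List.slice chunk (some j) (some (j + 4))
         let s := fmtGroupB group
         if group.length == 4 then (if j == 12 then s ++ "\n" else s ++ " ") else s)) ""
    = fmtLinePeel (chunk.drop jn) jn := by
  by_cases h : jn < chunk.length
  · have hslice : PySem.List.slice chunk (some (jn : Int)) (some ((jn : Int) + 4))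
        = (chunk.drop jn).take 4 := by
      have h4 : ((jn : Int) + 4) = ((jn : Int) + ((4 : Nat) : Int)) := by norm_num
      rw [h4, PySem.List.slice_natCast_add]
    have hdd : (chunk.drop jn).drop 4 = chunk.drop (jn + 4) := by
      rw [List.drop_drop]
    have hne : chunk.drop jn ≠ [] := by
      intro hnil
      have := List.drop_eq_nil_iff.mp hnil
      omega
    have hj12 : (((jn : Int)) == (12:Int)) = (jn == 12) := by
      by_cases hj : jn = 12
      · subst hj; simp
      · have hz : (jn : Int) ≠ 12 := by exact_mod_cast hj
        simp [hj, hz]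
    rw [pyRange_cons_pos 4 (by norm_num) _ _ (by exact_mod_cast h)]
    rw [List.foldl_cons, foldl_out_g]
    simp only [String.empty_append, hslice, hj12]
    have hcast : ((jn : Int) + 4) = (((jn + 4 : Nat)) : Int) := by push_cast; ring
    rw [hcast, innerB chunk (jn + 4)]
    rw [fmtLinePeel_cons (chunk.drop jn) jn hne, hdd]
    simp [fmtGroupB]
  · rw [pyRange_nil_pos 4 (by norm_num) _ _ (by omega)]
    rw [List.drop_eq_nil_of_le (by omega)]
    simp [fmtLinePeel]
termination_by chunk.length - jn
decreasing_by omega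

theorem fmtLineB_eq_peel (chunk : List String) : fmtLineB chunk = fmtLinePeel chunk 0 := by
  have h := innerB chunk 0
  simpa [fmtLineB] using h

theorem outerB (bin_data : List String) (k : Nat) :
    (PySem.List.pyRange (k : Int) bin_data.length 16).foldl (fun out i =>
      out ++ fmtLineB (PySem.List.slice bin_data (some i) (some (i + 16)))) ""
    = fmtLinesPeel (bin_data.drop k) := by
  by_cases h : k < bin_data.length
  · have hslice : PySem.List.slice bin_data (some (k : Int)) (some ((k : Int) + 16))
        = (bin_data.drop k).take 16 := by
      have h16 : ((k : Int) + 16) = ((k : Int) + ((16 : Nat) : Int)) := by norm_num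
      rw [h16, PySem.List.slice_natCast_add]
    have hdd : (bin_data.drop k).drop 16 = bin_data.drop (k + 16) := by
      rw [List.drop_drop]
    have hne : bin_data.drop k ≠ [] := by
      intro hnil
      have := List.drop_eq_nil_iff.mp hnil
      omega
    rw [pyRange_cons_pos 16 (by norm_num) _ _ (by exact_mod_cast h)]
    rw [List.foldl_cons, foldl_out_g]
    simp only [String.empty_append, hslice]
    have hcast : ((k : Int) + 16) = (((k + 16 : Nat)) : Int) := by push_cast; ring
    rw [hcast, outerB bin_data (k + 16)]
    rw [fmtLinesPeel_cons (bin_data.drop k) hne, hdd, fmtLineB_eq_peel]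
  · rw [pyRange_nil_pos 16 (by norm_num) _ _ (by omega)]
    rw [List.drop_eq_nil_of_le (by omega)]
    simp [fmtLinesPeel]
termination_by bin_data.length - k
decreasing_by omega

theorem alt_eq_peel (bin_data : List String) : fmt_bin_data_alt bin_data = fmtLinesPeel bin_data := by
  have h := outerB bin_data 0
  simpa [fmt_bin_data_alt] using h

-- ===== VERDICT (by name: the statement is the Claim_ definition above) =====
theorem fmt_bin_data_spec : Claim_equal_fmt_bin_data := by
  intro bin_data _
  unfold Spec_fmt_bin_data
  rw [fmt_bin_data_eq_fold, alt_eq_peel]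
  have h := linesEq bin_data 0 (by omega)
  simpa using h
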